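-- pv_equiv track=rewrite | github.com/TeodoraLazaroiu/FMI-Materials | Testarea Sistemelor Software/cursuri/Curs 7/7. bit_count/main.py | high_common_bits
-- ===== SOURCE A (Python) =====
-- def high_common_bits(a, b):
-- 	mask = 0x8000000000000000
-- 	output = 0
-- 	for i in reversed(range(64)):
-- 		if (a & mask) == (b & mask):
-- 			output |= a & mask
-- 		else:
-- 			output |= mask
-- 			return output
-- 		mask >>= 1
-- 	return output
-- ===== SOURCE B (Python) =====
-- def high_common_bits(a, b):
--     MASK = (1 << 64) - 1
--     a64 = a & MASK
--     diff = (a ^ b) & MASK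
--     if diff == 0:
--         return a64
--     h = diff.bit_length() - 1
--     return (a64 & (MASK ^ ((1 << (h + 1)) - 1))) | (1 << h)
-- ===== Notes on version B (the rewrite author's own statement) =====
-- stated objective: alternative
-- what changed: A's 64-iteration top-down bit scan with early return is replaced by a closed-form computation: truncate to 64 bits, find the highest differing bit with diff.bit_length(), and combine the common high bits with that bit via masks.
import Mathlib
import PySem

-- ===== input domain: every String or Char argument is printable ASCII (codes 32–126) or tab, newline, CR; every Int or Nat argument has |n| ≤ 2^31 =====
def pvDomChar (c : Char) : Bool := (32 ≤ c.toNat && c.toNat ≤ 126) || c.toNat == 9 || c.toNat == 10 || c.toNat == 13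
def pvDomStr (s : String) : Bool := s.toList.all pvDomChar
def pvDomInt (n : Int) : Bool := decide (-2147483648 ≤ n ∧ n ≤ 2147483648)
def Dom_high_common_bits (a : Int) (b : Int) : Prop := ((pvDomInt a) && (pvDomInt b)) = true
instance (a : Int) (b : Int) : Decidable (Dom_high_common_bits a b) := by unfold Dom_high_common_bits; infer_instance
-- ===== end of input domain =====

-- B replaces A's 64-iteration top-down bit scan by a closed-form computation from the
-- highest differing bit (diff.bit_length()); objective: alternative (no asymptotic claim).

-- ===== PORT A =====
-- 'for i in reversed(range(64))': the index i is unused, so the loop is ported as a fuel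
-- recursion over the same (mask, output) state, one step per iteration; the early
-- 'return output | mask' is the else branch's value.  & | are PySem.Int.band/bor (exact).
def hcbLoop (a b : Int) : Nat → Int → Int → Int
  | 0, _mask, output => output
  | n + 1, mask, output =>
    if PySem.Int.band a mask = PySem.Int.band b mask then
      hcbLoop a b n (mask >>> (1 : Nat)) (PySem.Int.bor output (PySem.Int.band a mask))
    else
      PySem.Int.bor output mask

def high_common_bits (a : Int) (b : Int) : Int :=
  hcbLoop a b 64 0x8000000000000000 0

-- ===== PORT B =====
def high_common_bits_alt (a : Int) (b : Int) : Int :=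
  let MASK : Int := (1 : Int) <<< (64 : Nat) - 1
  let a64 : Int := PySem.Int.band a MASK
  let diff : Int := PySem.Int.band (PySem.Int.bxor a b) MASK
  if diff = 0 then a64
  else
    -- diff > 0 here, so Python's 'diff.bit_length() - 1' is ≥ 0; kept as a Nat (shift amount)
    let h : Nat := PySem.Int.bitLength diff - 1
    PySem.Int.bor
      (PySem.Int.band a64 (PySem.Int.bxor MASK ((1 : Int) <<< (h + 1) - 1)))
      ((1 : Int) <<< h)

-- ===== PRECONDITION & SPEC =====
def Spec_high_common_bits (a : Int) (b : Int) (out : Int) : Prop := out = high_common_bits_alt a b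
instance (a : Int) (b : Int) (out : Int) : Decidable (Spec_high_common_bits a b out) := by unfold Spec_high_common_bits; infer_instance

-- ===== CLAIM (what is proved, stated in full; the proofs are below) =====
def Claim_equal_high_common_bits : Prop := ∀ (a : Int) (b : Int), Dom_high_common_bits a b → Spec_high_common_bits a b (high_common_bits a b)

-- ===== LEMMAS AND PROOFS =====

-- two's-complement bit i of an integer (Python's (x >> i) & 1 == 1)
def xbit (x : Int) (i : Nat) : Bool :=
  if 0 ≤ x then x.toNat.testBit i else !((-x - 1).toNat.testBit i)

-- the low 64 bits of x as a natural number (Python's x & ((1 << 64) - 1))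
def truncN (x : Int) : Nat := (PySem.Int.band x ((2 ^ 64 - 1 : Nat) : Int)).toNat

-- Nat model of A's loop: bit index n downwards, f = bits of a, e = "bits of a and b differ"
def loopN (f e : Nat → Bool) : Nat → Nat → Nat
  | 0, out => if e 0 then out ||| 1 else out ||| (f 0).toNat
  | n + 1, out =>
    if e (n + 1) then out ||| 2 ^ (n + 1)
    else loopN f e n (out ||| (f (n + 1)).toNat * 2 ^ (n + 1))

-- closed form for what the loop computes on the low n+1 bits
def cfN (A B : Nat) (n : Nat) : Nat :=
  let d := (A ^^^ B) % 2 ^ (n + 1)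
  if d = 0 then A % 2 ^ (n + 1)
  else (A &&& ((2 ^ (n + 1) - 1) ^^^ (2 ^ (d.log2 + 1) - 1))) ||| 2 ^ d.log2

theorem and_add_ldiff (m c : Nat) : (m &&& c) + Nat.ldiff m c = m := by
  induction m using Nat.binaryRec generalizing c with
  | zero =>
    simp only [Nat.zero_and, Nat.zero_add]
    exact Nat.eq_of_testBit_eq fun i => by simp [Nat.testBit_ldiff]
  | bit b n ih =>
    induction c using Nat.binaryRec with
    | zero =>
      have h0 : Nat.bit b n &&& 0 = 0 := Nat.and_zero _
      have h1 : Nat.ldiff (Nat.bit b n) 0 = Nat.bit b n := by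
        apply Nat.eq_of_testBit_eq; intro i; simp [Nat.testBit_ldiff]
      rw [h0, h1]; omega
    | bit b' c' _ =>
      rw [Nat.land_bit, Nat.ldiff_bit]
      simp only [Nat.bit_val]
      have := ih c'
      cases b <;> cases b' <;> simp <;> omega

theorem sub_and_eq_ldiff (m c : Nat) : m - (m &&& c) = Nat.ldiff m c := by
  have := and_add_ldiff m c; omega

theorem band_nat_nonneg (x : Int) (m : Nat) : 0 ≤ PySem.Int.band x (m : Int) := by
  unfold PySem.Int.band
  split_ifs with h1 h2 h2 <;> simp_all <;> omega

theorem band_toNat_testBit (x : Int) (m i : Nat) :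
    (PySem.Int.band x (m : Int)).toNat.testBit i = (xbit x i && m.testBit i) := by
  unfold PySem.Int.band xbit
  by_cases h : 0 ≤ x
  · simp [h, Nat.testBit_land]
  · simp only [h, if_false, if_neg, Int.ofNat_nonneg, if_true, if_pos (Int.natCast_nonneg m)]
    rw [Int.toNat_natCast, Int.toNat_natCast, sub_and_eq_ldiff, Nat.testBit_ldiff]
    simp [Bool.and_comm]

theorem xbit_natCast (n : Nat) (i : Nat) : xbit (n : Int) i = n.testBit i := by
  simp [xbit]

theorem xbit_neg_natCast_sub_one (n : Nat) (i : Nat) : xbit (-(n : Int) - 1) i = !(n.testBit i) := by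
  have h : ¬ (0 ≤ -(n : Int) - 1) := by omega
  simp only [xbit, h, if_false]
  norm_num

theorem xbit_bxor (a b : Int) (i : Nat) :
    xbit (PySem.Int.bxor a b) i = ((xbit a i).xor (xbit b i)) := by
  unfold PySem.Int.bxor
  by_cases ha : 0 ≤ a <;> by_cases hb : 0 ≤ b <;>
    simp only [ha, hb, if_true, if_false, xbit_natCast, xbit_neg_natCast_sub_one] <;>
    simp only [xbit, ha, hb, if_true, if_false, Nat.testBit_xor] <;>
    cases ((-a - 1).toNat.testBit i) <;> cases ((-b - 1).toNat.testBit i) <;>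
    cases (a.toNat.testBit i) <;> cases (b.toNat.testBit i) <;> simp

theorem truncN_testBit (x : Int) (i : Nat) :
    (truncN x).testBit i = (xbit x i && decide (i < 64)) := by
  unfold truncN
  rw [band_toNat_testBit, Nat.testBit_two_pow_sub_one]

theorem truncN_lt (x : Int) : truncN x < 2 ^ 64 := by
  apply Nat.lt_pow_two_of_testBit
  intro i hi
  rw [truncN_testBit]
  simp only [Bool.and_eq_false_iff]
  right
  simpa using by omega

theorem band_two_pow (x : Int) (k : Nat) :
    PySem.Int.band x ((2 ^ k : Nat) : Int) = if xbit x k then ((2 ^ k : Nat) : Int) else 0 := by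
  have hnn := band_nat_nonneg x (2 ^ k)
  have key : (PySem.Int.band x ((2 ^ k : Nat) : Int)).toNat = if xbit x k then 2 ^ k else 0 := by
    apply Nat.eq_of_testBit_eq
    intro i
    rw [band_toNat_testBit, Nat.testBit_two_pow]
    cases hx : xbit x k <;> by_cases hik : k = i
    · subst hik; simp [hx]
    · simp [hik]
    · subst hik; simp [hx, Nat.testBit_two_pow]
    · simp [hik, Nat.testBit_two_pow, Ne.symm hik]
  rw [← Int.toNat_of_nonneg hnn, key]
  split_ifs <;> simp

theorem band_two_pow_eq_iff (a b : Int) (k : Nat) :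
    (PySem.Int.band a ((2 ^ k : Nat) : Int) = PySem.Int.band b ((2 ^ k : Nat) : Int))
      ↔ xbit a k = xbit b k := by
  rw [band_two_pow, band_two_pow]
  cases xbit a k <;> cases xbit b k <;> simp <;> positivity

theorem band_two_pow_toNatVal (x : Int) (k : Nat) :
    PySem.Int.band x ((2 ^ k : Nat) : Int) = (((xbit x k).toNat * 2 ^ k : Nat) : Int) := by
  rw [band_two_pow]; cases xbit x k <;> simp

theorem natCast_two_pow_shiftRight (n : Nat) :
    ((2 ^ (n + 1) : Nat) : Int) >>> (1 : Nat) = ((2 ^ n : Nat) : Int) := by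
  have h1 : ((2 ^ (n + 1) : Nat) : Int) >>> (1 : Nat) = (((2 ^ (n + 1) : Nat) >>> 1 : Nat) : Int) := by
    simp
  rw [h1, Nat.shiftRight_one]
  congr 1
  rw [Nat.pow_succ]
  omega

theorem hcbLoop_eq_loopN (a b : Int) :
    ∀ (n : Nat) (out : Nat),
      hcbLoop a b (n + 1) ((2 ^ n : Nat) : Int) (out : Int)
        = ((loopN (xbit a) (fun i => !(xbit a i == xbit b i)) n out : Nat) : Int) := by
  intro n
  induction n with
  | zero =>
    intro out
    show (if PySem.Int.band a ((2 ^ 0 : Nat) : Int) = PySem.Int.band b ((2 ^ 0 : Nat) : Int) then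
        hcbLoop a b 0 (((2 ^ 0 : Nat) : Int) >>> (1:Nat)) (PySem.Int.bor ↑out (PySem.Int.band a ((2 ^ 0 : Nat) : Int)))
      else PySem.Int.bor ↑out ((2 ^ 0 : Nat) : Int)) = _
    by_cases h : PySem.Int.band a ((2 ^ 0 : Nat) : Int) = PySem.Int.band b ((2 ^ 0 : Nat) : Int)
    · have he : xbit a 0 = xbit b 0 := (band_two_pow_eq_iff a b 0).1 h
      rw [if_pos h, band_two_pow_toNatVal, PySem.Int.bor_natCast]
      show ((out ||| (xbit a 0).toNat * 2 ^ 0 : Nat) : Int) = _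
      simp only [loopN, he]
      simp
    · have he : ¬ (xbit a 0 = xbit b 0) := fun hx => h ((band_two_pow_eq_iff a b 0).2 hx)
      rw [if_neg h, PySem.Int.bor_natCast]
      simp only [loopN]
      rw [if_pos (by simpa using he)]
      norm_num
  | succ n ih =>
    intro out
    show (if PySem.Int.band a ((2 ^ (n+1) : Nat) : Int) = PySem.Int.band b ((2 ^ (n+1) : Nat) : Int) then
        hcbLoop a b (n+1) (((2 ^ (n+1) : Nat) : Int) >>> (1:Nat)) (PySem.Int.bor ↑out (PySem.Int.band a ((2 ^ (n+1) : Nat) : Int)))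
      else PySem.Int.bor ↑out ((2 ^ (n+1) : Nat) : Int)) = _
    by_cases h : PySem.Int.band a ((2 ^ (n+1) : Nat) : Int) = PySem.Int.band b ((2 ^ (n+1) : Nat) : Int)
    · have he : xbit a (n+1) = xbit b (n+1) := (band_two_pow_eq_iff a b (n+1)).1 h
      rw [if_pos h, band_two_pow_toNatVal, PySem.Int.bor_natCast, natCast_two_pow_shiftRight, ih]
      simp only [loopN, he]
      simp
    · have he : ¬ (xbit a (n+1) = xbit b (n+1)) := fun hx => h ((band_two_pow_eq_iff a b (n+1)).2 hx)
      rw [if_neg h, PySem.Int.bor_natCast]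
      simp only [loopN]
      rw [if_pos (by simpa using he)]

theorem loopN_congr (f e f' e' : Nat → Bool) :
    ∀ (n : Nat) (out : Nat), (∀ i, i ≤ n → f i = f' i ∧ e i = e' i) →
      loopN f e n out = loopN f' e' n out := by
  intro n
  induction n with
  | zero =>
    intro out h
    obtain ⟨hf, he⟩ := h 0 (le_refl 0)
    simp only [loopN, hf, he]
  | succ n ih =>
    intro out h
    obtain ⟨hf, he⟩ := h (n + 1) (le_refl _)
    simp only [loopN, hf, he]
    by_cases hc : e' (n + 1) = true
    · simp [hc]
    · simp only [Bool.not_eq_true] at hc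
      rw [hc, if_neg (by simp), if_neg (by simp)]
      exact ih _ (fun i hi => h i (by omega))

theorem bne_testBit (A B : Nat) (i : Nat) :
    (!(A.testBit i == B.testBit i)) = (A ^^^ B).testBit i := by
  rw [Nat.testBit_xor]
  cases A.testBit i <;> cases B.testBit i <;> rfl

theorem loopN_closed (A B : Nat) :
    ∀ (n : Nat) (out : Nat),
      loopN A.testBit (fun i => !(A.testBit i == B.testBit i)) n out = out ||| cfN A B n := by
  intro n
  induction n with
  | zero =>
    intro out
    simp only [loopN, cfN, bne_testBit]
    by_cases he : (A ^^^ B).testBit 0 = true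
    · have hd : (A ^^^ B) % 2 ^ 1 ≠ 0 := by
        intro h0
        have h2 := Nat.testBit_mod_two_pow (A ^^^ B) 1 0
        rw [h0] at h2
        simp [he] at h2
      have hd1 : (A ^^^ B) % 2 ^ 1 = 1 := by
        have h2 : (A ^^^ B) % 2 ^ 1 < 2 := Nat.mod_lt _ (by norm_num)
        omega
      rw [if_pos he, if_neg hd, hd1]
      have hl : Nat.log2 1 = 0 := rfl
      rw [hl]
      norm_num [Nat.xor_self, Nat.and_zero]
    · simp only [Bool.not_eq_true] at he
      have hd : (A ^^^ B) % 2 ^ 1 = 0 := by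
        apply Nat.eq_of_testBit_eq
        intro i
        rw [Nat.testBit_mod_two_pow]
        by_cases hi : i = 0
        · subst hi; simp [he]
        · have hi2 : ¬ (i < 1) := by omega
          simp [hi2]
      rw [if_neg (by simp [he]), if_pos hd]
      congr 1
      have h0 := Nat.testBit_zero A
      cases hb : A.testBit 0 <;> rw [hb] at h0 <;> simp at h0 ⊢ <;> omega
  | succ n ih =>
    intro out
    simp only [loopN, bne_testBit]
    rw [funext (bne_testBit A B)] at ih
    by_cases he : (A ^^^ B).testBit (n + 1) = true
    · rw [if_pos he]
      have hd : (A ^^^ B) % 2 ^ (n + 2) ≠ 0 := by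
        intro h0
        have h2 := Nat.testBit_mod_two_pow (A ^^^ B) (n + 2) (n + 1)
        rw [h0] at h2
        simp only [Nat.zero_testBit] at h2
        rw [he] at h2
        simp at h2
      have hge : 2 ^ (n + 1) ≤ (A ^^^ B) % 2 ^ (n + 2) := by
        by_contra hlt
        push_neg at hlt
        have h2 := Nat.testBit_eq_false_of_lt hlt
        rw [Nat.testBit_mod_two_pow, he] at h2
        simp at h2
      have hltm : (A ^^^ B) % 2 ^ (n + 2) < 2 ^ (n + 2) := Nat.mod_lt _ (by positivity)
      have hlog : ((A ^^^ B) % 2 ^ (n + 2)).log2 = n + 1 := by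
        have h1 : n + 1 ≤ ((A ^^^ B) % 2 ^ (n + 2)).log2 := (Nat.le_log2 hd).2 hge
        have h2 : ((A ^^^ B) % 2 ^ (n + 2)).log2 < n + 2 := (Nat.log2_lt hd).2 hltm
        omega
      simp only [cfN, if_neg hd, hlog]
      rw [Nat.xor_self, Nat.and_zero, Nat.zero_or]
    · simp only [Bool.not_eq_true] at he
      rw [if_neg (by simp [he]), ih]
      have hbitv : (A.testBit (n + 1)).toNat * 2 ^ (n + 1) = A &&& 2 ^ (n + 1) :=
        (Nat.and_two_pow A (n + 1)).symm
      rw [hbitv, Nat.lor_assoc]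
      congr 1
      have hdd : (A ^^^ B) % 2 ^ (n + 2) = (A ^^^ B) % 2 ^ (n + 1) := by
        apply Nat.eq_of_testBit_eq
        intro i
        rw [Nat.testBit_mod_two_pow, Nat.testBit_mod_two_pow]
        by_cases hi : i = n + 1
        · subst hi; simp [he]
        · by_cases hi2 : i < n + 1
          · have ha : i < n + 2 := by omega
            simp [ha, hi2]
          · have ha : ¬ (i < n + 2) := by omega
            simp [ha, hi2]
      simp only [cfN, hdd]
      by_cases hd0 : (A ^^^ B) % 2 ^ (n + 1) = 0
      · rw [if_pos hd0, if_pos hd0]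
        apply Nat.eq_of_testBit_eq
        intro i
        simp only [Nat.testBit_mod_two_pow, Nat.testBit_lor, Nat.testBit_land, Nat.testBit_two_pow]
        rw [Bool.eq_iff_iff]
        cases hA : A.testBit i <;> simp <;> omega
      · rw [if_neg hd0, if_neg hd0]
        have hhlt : ((A ^^^ B) % 2 ^ (n + 1)).log2 < n + 1 :=
          (Nat.log2_lt hd0).2 (Nat.mod_lt _ (by positivity))
        set h := ((A ^^^ B) % 2 ^ (n + 1)).log2 with hh
        apply Nat.eq_of_testBit_eq
        intro i
        simp only [Nat.testBit_lor, Nat.testBit_land, Nat.testBit_xor,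
          Nat.testBit_two_pow_sub_one, Nat.testBit_two_pow]
        rw [Bool.eq_iff_iff]
        cases hA : A.testBit i <;> simp <;> omega

theorem bitLength_natCast_log2 (m : Nat) (h : 0 < m) :
    PySem.Int.bitLength (m : Int) = Nat.log2 m + 1 := by
  have h1 := PySem.Int.lt_two_pow_bitLength (m : Int)
  have h2 := PySem.Int.two_pow_bitLength_le (m : Int) (by exact_mod_cast (by omega : (m:Int) ≠ 0))
  rw [Int.natAbs_natCast] at h1 h2
  have hL : 1 ≤ PySem.Int.bitLength (m : Int) := by
    by_contra hc
    have : PySem.Int.bitLength (m : Int) = 0 := by omega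
    rw [this] at h1
    omega
  have ha : Nat.log2 m < PySem.Int.bitLength (m : Int) := (Nat.log2_lt (by omega)).2 h1
  have hb : PySem.Int.bitLength (m : Int) - 1 ≤ Nat.log2 m := (Nat.le_log2 (by omega)).2 h2
  omega

theorem truncN_bxor (a b : Int) : truncN (PySem.Int.bxor a b) = truncN a ^^^ truncN b := by
  apply Nat.eq_of_testBit_eq
  intro i
  rw [Nat.testBit_xor, truncN_testBit, truncN_testBit, truncN_testBit, xbit_bxor]
  cases xbit a i <;> cases xbit b i <;> cases hi : decide (i < 64) <;> simp

theorem one_shiftLeft_nat (k : Nat) : (1 : Int) <<< k = ((2 ^ k : Nat) : Int) := by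
  have h1 : (1 : Int) <<< k = (((1 <<< k : Nat) : Nat) : Int) := by simp
  rw [h1, Nat.one_shiftLeft]

theorem portA_closed (a b : Int) :
    high_common_bits a b = ((cfN (truncN a) (truncN b) 63 : Nat) : Int) := by
  unfold high_common_bits
  have hm : (0x8000000000000000 : Int) = ((2 ^ 63 : Nat) : Int) := by norm_num
  have h0 : (0 : Int) = ((0 : Nat) : Int) := rfl
  rw [hm, h0, hcbLoop_eq_loopN a b 63 0]
  rw [loopN_congr (xbit a) (fun i => !(xbit a i == xbit b i)) (truncN a).testBit
      (fun i => !((truncN a).testBit i == (truncN b).testBit i)) 63 0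
      (fun i hi => by
        have hfa : xbit a i = (truncN a).testBit i := by
          rw [truncN_testBit]; simp [show i < 64 by omega]
        have hfb : xbit b i = (truncN b).testBit i := by
          rw [truncN_testBit]; simp [show i < 64 by omega]
        exact ⟨hfa, by simp only [hfa, hfb]⟩)]
  rw [loopN_closed, Nat.zero_or]

theorem portB_closed (a b : Int) :
    high_common_bits_alt a b = ((cfN (truncN a) (truncN b) 63 : Nat) : Int) := by
  unfold high_common_bits_alt
  have hM : (1 : Int) <<< (64 : Nat) - 1 = ((2 ^ 64 - 1 : Nat) : Int) := by
    rw [one_shiftLeft_nat]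
    have h1 : (1:Nat) ≤ 2 ^ 64 := Nat.one_le_two_pow
    push_cast [h1]
  simp only [hM]
  have ha64 : PySem.Int.band a ((2 ^ 64 - 1 : Nat) : Int) = ((truncN a : Nat) : Int) :=
    (Int.toNat_of_nonneg (band_nat_nonneg a (2 ^ 64 - 1))).symm
  have hdiff : PySem.Int.band (PySem.Int.bxor a b) ((2 ^ 64 - 1 : Nat) : Int)
      = ((truncN a ^^^ truncN b : Nat) : Int) := by
    rw [← truncN_bxor]
    exact (Int.toNat_of_nonneg (band_nat_nonneg _ (2 ^ 64 - 1))).symm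
  rw [ha64, hdiff]
  have hd : (truncN a ^^^ truncN b) % 2 ^ (63 + 1) = truncN a ^^^ truncN b :=
    Nat.mod_eq_of_lt (Nat.xor_lt_two_pow (truncN_lt a) (truncN_lt b))
  by_cases h0 : truncN a ^^^ truncN b = 0
  · rw [if_pos (by exact_mod_cast congrArg (Nat.cast : Nat → Int) h0)]
    unfold cfN
    simp only [hd, if_pos h0]
    rw [Nat.mod_eq_of_lt (truncN_lt a)]
  · rw [if_neg (by exact_mod_cast fun h => h0 (Nat.cast_injective h))]
    have hbl : PySem.Int.bitLength ((truncN a ^^^ truncN b : Nat) : Int) - 1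
        = (truncN a ^^^ truncN b).log2 := by
      rw [bitLength_natCast_log2 _ (by omega)]
      omega
    rw [hbl, one_shiftLeft_nat, one_shiftLeft_nat]
    have hsub : ((2 ^ ((truncN a ^^^ truncN b).log2 + 1) : Nat) : Int) - 1
        = ((2 ^ ((truncN a ^^^ truncN b).log2 + 1) - 1 : Nat) : Int) := by
      push_cast [Nat.one_le_two_pow]
      ring
    rw [hsub, PySem.Int.bxor_natCast, PySem.Int.band_natCast, PySem.Int.bor_natCast]
    unfold cfN
    simp only [hd, if_neg h0]

-- ===== VERDICT (by name: the statement is the Claim_ definition above) =====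
theorem high_common_bits_spec : Claim_equal_high_common_bits := by
  intro a b _
  unfold Spec_high_common_bits
  rw [portA_closed, portB_closed]
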